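-- pv_equiv track=rewrite | github.com/chrireed/EECS_573_Project_Code_Compression | profilebitfields.py | get_opcodes
-- ===== SOURCE A (Python) =====
-- def get_bit_range(instruction, end, start):
--     start_idx   = 32 - start
--     end_idx     = 32 - end - 1
--     opcode_bin = instruction[end_idx:start_idx]  # Extract last 7 bits as opcode
--     return opcode_bin
--
-- def get_opcode(instr):
--     bitfield = get_bit_range(instr, 6, 0)
--     return bitfield
--
-- def get_opcodes(instructions):
--     unique_opcodes = []
--     opcodes = {}
--     for instr in instructions:
--         opcode = get_opcode(instr)
--         if opcode not in unique_opcodes: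
--             unique_opcodes.append(opcode)
--             opcodes[opcode] = 0
--         opcodes[opcode] += instructions[instr]
--
--     return opcodes
-- ===== SOURCE B (Python) =====
-- def get_opcodes(instructions):
--     keyed = [(instr[25:32], weight) for instr, weight in instructions.items()]
--     order = list(dict.fromkeys(op for op, _ in keyed))
--     return {op: sum(w for o, w in keyed if o == op) for op in order}
-- ===== Notes on version B (the rewrite author's own statement) =====
-- stated objective: alternative
-- what changed: Replaces A's single-pass scatter into a counter dict (with a linearly scanned unique_opcodes list) by a staged gather: one pass builds (opcode, weight) pairs, dict.fromkeys dedups the opcodes in first-seen order, then for each distinct opcode a generator scans the pair list and sums the matching weights.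
import Mathlib
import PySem

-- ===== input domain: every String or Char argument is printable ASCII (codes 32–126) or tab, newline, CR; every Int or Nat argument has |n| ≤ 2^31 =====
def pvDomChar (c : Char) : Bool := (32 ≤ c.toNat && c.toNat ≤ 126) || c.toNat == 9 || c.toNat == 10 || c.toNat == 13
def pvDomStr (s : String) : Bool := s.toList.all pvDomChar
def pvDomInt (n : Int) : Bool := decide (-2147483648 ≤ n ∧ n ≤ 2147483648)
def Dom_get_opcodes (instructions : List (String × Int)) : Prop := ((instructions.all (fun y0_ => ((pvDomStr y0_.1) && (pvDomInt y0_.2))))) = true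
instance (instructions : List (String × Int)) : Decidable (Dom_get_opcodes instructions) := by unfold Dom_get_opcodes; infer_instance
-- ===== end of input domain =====

-- B replaces A's one-pass scatter (counter dict + scanned unique_opcodes list) with a staged
-- gather: map to (opcode, weight) pairs, dedup the opcodes, per-opcode filter-and-sum; objective: alternative.


-- ===== PORT A =====
def pvA_get_bit_range (instruction : String) (endB startB : Int) : String :=
  let start_idx : Int := 32 - startB
  let end_idx : Int := 32 - endB - 1
  PySem.Str.slice instruction (some end_idx) (some start_idx)

def pvA_get_opcode (instr : String) : String :=
  pvA_get_bit_range instr 6 0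

-- The Python receives a dict; the association list is read as that dict (Dict.ofList).
-- 'opcodes[opcode] += instructions[instr]': the key was just ensured present, so
-- 'modify opcode 0' is exact; 'instructions[instr]' is the dict lookup d.getD.
def get_opcodes (instructions : List (String × Int)) : List (String × Int) :=
  let d := PySem.Dict.ofList instructions
  (d.items.foldl
    (fun (st : List String × PySem.Dict String Int) instr =>
      let opcode := pvA_get_opcode instr.1
      let st' := if !(st.1.contains opcode) then (st.1 ++ [opcode], st.2.insert opcode 0) else st
      (st'.1, st'.2.modify opcode 0 (· + d.getD instr.1 0)))
    ([], PySem.Dict.empty)).2.items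

-- ===== PORT B =====
-- keyed = [(instr[25:32], weight) ...]; list(dict.fromkeys(...)) = PySem.List.dedup;
-- the comprehension 'sum(w for o, w in keyed if o == op)' = filter + map snd + sum.
def get_opcodes_alt (instructions : List (String × Int)) : List (String × Int) :=
  let d := PySem.Dict.ofList instructions
  let keyed := d.items.map (fun p => (PySem.Str.slice p.1 (some 25) (some 32), p.2))
  let order := PySem.List.dedup (keyed.map Prod.fst)
  order.map (fun op => (op, ((keyed.filter (fun q => q.1 == op)).map Prod.snd).sum))

-- ===== PRECONDITION & SPEC =====
def Spec_get_opcodes (instructions : List (String × Int)) (out : List (String × Int)) : Prop := out = get_opcodes_alt instructions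
instance (instructions : List (String × Int)) (out : List (String × Int)) : Decidable (Spec_get_opcodes instructions out) := by unfold Spec_get_opcodes; infer_instance

-- ===== CLAIM =====
def Claim_equal_get_opcodes : Prop := ∀ (instructions : List (String × Int)), Dom_get_opcodes instructions → Spec_get_opcodes instructions (get_opcodes instructions)

-- ===== LEMMAS AND PROOFS =====

theorem pv_opcode_eq (s : String) :
    pvA_get_opcode s = PySem.Str.slice s (some 25) (some 32) := by
  norm_num [pvA_get_opcode, pvA_get_bit_range]

-- A's conditional (append to unique_opcodes + insert 0) followed by the += collapses
-- to a single modify, and the unique list is exactly the keys of the counter dict.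
theorem pvA_step (c : PySem.Dict String Int) (op : String) (v : Int) :
    (((if (!c.keys.contains op) = true then (c.keys ++ [op], c.insert op 0) else (c.keys, c)).1,
      (if (!c.keys.contains op) = true then (c.keys ++ [op], c.insert op 0) else (c.keys, c)).2.modify
        op 0 (· + v)) : List String × PySem.Dict String Int)
    = ((c.modify op 0 (· + v)).keys, c.modify op 0 (· + v)) := by
  by_cases hmem : op ∈ c.keys
  · have hc : c.contains op = true :=
      (PySem.Dict.contains_iff_mem_keys _ _).mpr hmem
    simp [hmem, PySem.Dict.modify, PySem.Dict.keys_insert_of_contains _ _ hc]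
  · have hc : c.contains op = false := by
      rw [← Bool.not_eq_true]
      exact fun h => hmem ((PySem.Dict.contains_iff_mem_keys c _).mp h)
    simp [hmem, PySem.Dict.modify, PySem.Dict.getD_insert_self,
      PySem.Dict.insert_insert_self, PySem.Dict.getD_of_not_contains _ _ hc,
      PySem.Dict.keys_insert_of_not_contains _ _ hc]

-- the unique_opcodes component is the counter's key list; the whole pair-fold
-- projects to a plain modify-fold over the counter dict
theorem pvA_fold (xs : List (String × Int)) (w : String × Int → Int) :
    ∀ c : PySem.Dict String Int,
    (xs.foldl
      (fun (st : List String × PySem.Dict String Int) instr =>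
        let opcode := pvA_get_opcode instr.1
        let st' := if !(st.1.contains opcode) then (st.1 ++ [opcode], st.2.insert opcode 0) else st
        (st'.1, st'.2.modify opcode 0 (· + w instr)))
      (c.keys, c)).2
    = xs.foldl (fun c p => c.modify (pvA_get_opcode p.1) 0 (· + w p)) c := by
  induction xs with
  | nil => intro c; rfl
  | cons p xs ih =>
    intro c
    simp only [List.foldl_cons]
    rw [pvA_step c (pvA_get_opcode p.1) (w p)]
    exact ih _

-- getD of a modify-add fold is the starting value plus the sum of matching weights
theorem pv_getD_fold (zs : List (String × Int)) :
    ∀ (d : PySem.Dict String Int) (k : String),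
    (zs.foldl (fun c q => c.modify q.1 0 (· + q.2)) d).getD k 0
    = d.getD k 0 + ((zs.filter (fun q => q.1 == k)).map Prod.snd).sum := by
  induction zs with
  | nil => intro d k; simp
  | cons q zs ih =>
    intro d k
    simp only [List.foldl_cons, List.filter_cons]
    rw [ih]
    by_cases h : q.1 = k
    · simp [h, PySem.Dict.getD_modify_self, add_assoc]
    · simp [h, PySem.Dict.getD_modify, Ne.symm h]

theorem get_opcodes_spec : Claim_equal_get_opcodes := by
  intro instructions _
  unfold Spec_get_opcodes get_opcodes get_opcodes_alt
  dsimp only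
  -- A's pair-fold projects to a counter fold (pvA_fold); its per-item weight
  -- d.getD p.1 0 equals p.2 on d.items (keys are nodup).
  rw [show (([] : List String), (PySem.Dict.empty : PySem.Dict String Int))
        = ((PySem.Dict.empty : PySem.Dict String Int).keys, PySem.Dict.empty) from rfl]
  rw [pvA_fold]
  rw [PySem.List.foldl_congr_mem _ _
      (fun (c : PySem.Dict String Int) p => c.modify (pvA_get_opcode p.1) 0 (· + p.2)) _
      (fun acc x hx => by
        rw [PySem.Dict.getD_of_mem_items (PySem.Dict.ofList instructions)
          (by simpa using hx) (PySem.Dict.nodup_keys_ofList instructions)])]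
  -- the counter fold over items IS the same fold over the keyed pair list
  have hmap : ((PySem.Dict.ofList instructions).items.foldl
      (fun (c : PySem.Dict String Int) p => c.modify (pvA_get_opcode p.1) 0 (· + p.2))
      PySem.Dict.empty)
    = ((PySem.Dict.ofList instructions).items.map
        (fun p => (PySem.Str.slice p.1 (some 25) (some 32), p.2))).foldl
      (fun (c : PySem.Dict String Int) q => c.modify q.1 0 (· + q.2)) PySem.Dict.empty := by
    rw [List.foldl_map]
    exact PySem.List.foldl_congr_mem _ _ _ _ (fun acc x _ => by rw [pv_opcode_eq])
  rw [hmap]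
  set zs := ((PySem.Dict.ofList instructions).items.map
      (fun p => (PySem.Str.slice p.1 (some 25) (some 32), p.2))) with hzs
  -- items of the fold: keys are the deduped opcode list, values the filtered sums
  have hnodup : (zs.foldl (fun (c : PySem.Dict String Int) q => c.modify q.1 0 (· + q.2))
      PySem.Dict.empty).keys.Nodup := by
    have := PySem.Dict.nodup_keys_foldl_modify_key zs (fun q => q.1) 0
      (fun _ q => (· + q.2)) PySem.Dict.empty (by simp)
    simpa using this
  rw [PySem.Dict.items_eq_map_keys _ hnodup 0]
  have hkeys : (zs.foldl (fun (c : PySem.Dict String Int) q => c.modify q.1 0 (· + q.2))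
      PySem.Dict.empty).keys = PySem.List.dedup (zs.map Prod.fst) := by
    have := PySem.Dict.keys_foldl_modify_key zs (fun q => q.1) 0
      (fun _ q => (· + q.2)) PySem.Dict.empty
    simpa [PySem.Set.update, PySem.List.dedup_eq_ofList, PySem.Set.ofList] using this
  rw [hkeys]
  refine List.map_congr_left (fun k _ => ?_)
  rw [pv_getD_fold]
  simp
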